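-- pv_equiv track=rewrite | github.com/adpena/molt | src/molt/_wasm_runtime_exports.py | wasm_runtime_missing_required_exports
-- ===== SOURCE A (Python) =====
-- from typing import Iterable
--
-- _BROWSER_RUNTIME_IMPORT_FALLBACK_EXPORTS = {
--     "molt_resource_on_allocate": (),
--     "molt_resource_on_free": (),
--     "molt_fast_list_append": (
--         "molt_call_bind_ic",
--         "molt_callargs_new",
--         "molt_callargs_push_pos",
--     ),
--     "molt_fast_str_join": (
--         "molt_call_bind_ic",
--         "molt_callargs_new",
--         "molt_callargs_push_pos",
--     ),
--     "molt_fast_dict_get": (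
--         "molt_call_bind_ic",
--         "molt_callargs_new",
--         "molt_callargs_push_pos",
--     ),
--     "molt_dict_setitem": ("molt_dict_set",),
--     "molt_dict_getitem": ("molt_dict_getitem_borrowed",),
--     "molt_tuple_getitem": ("molt_tuple_getitem_borrowed",),
-- }
--
-- def _normalize_runtime_export_name(name: str) -> str:
--     return name if name.startswith("molt_") else f"molt_{name}"
--
-- def wasm_runtime_missing_required_exports(
--     export_names: Iterable[str],
--     required_runtime_imports: Iterable[str] | None,
-- ) -> set[str]:
--     if not required_runtime_imports:
--         return set()
--     available = set(export_names)
--     missing: set[str] = set()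
--     for raw_name in required_runtime_imports:
--         name = _normalize_runtime_export_name(raw_name)
--         if name in available:
--             continue
--         fallback_exports = _BROWSER_RUNTIME_IMPORT_FALLBACK_EXPORTS.get(name)
--         if fallback_exports is not None and set(fallback_exports).issubset(available):
--             continue
--         missing.add(name)
--     return missing
-- ===== SOURCE B (Python) =====
-- _BROWSER_RUNTIME_IMPORT_FALLBACK_EXPORTS = {
--     "molt_resource_on_allocate": (),
--     "molt_resource_on_free": (),
--     "molt_fast_list_append": (
--         "molt_call_bind_ic",
--         "molt_callargs_new",
--         "molt_callargs_push_pos",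
--     ),
--     "molt_fast_str_join": (
--         "molt_call_bind_ic",
--         "molt_callargs_new",
--         "molt_callargs_push_pos",
--     ),
--     "molt_fast_dict_get": (
--         "molt_call_bind_ic",
--         "molt_callargs_new",
--         "molt_callargs_push_pos",
--     ),
--     "molt_dict_setitem": ("molt_dict_set",),
--     "molt_dict_getitem": ("molt_dict_getitem_borrowed",),
--     "molt_tuple_getitem": ("molt_tuple_getitem_borrowed",),
-- }
--
--
-- def _normalize_runtime_export_name(name: str) -> str:
--     return name if name.startswith("molt_") else f"molt_{name}"
--
--
-- def wasm_runtime_missing_required_exports(export_names, required_runtime_imports):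
--     if not required_runtime_imports:
--         return set()
--     available = set(export_names)
--     # Fold the fallback table into the availability set ONCE: a fallback key is
--     # effectively available when all of its fallback exports are present.
--     covered = {
--         key
--         for key, fallback in _BROWSER_RUNTIME_IMPORT_FALLBACK_EXPORTS.items()
--         if available.issuperset(fallback)
--     }
--     satisfied = available | covered
--     return {_normalize_runtime_export_name(n) for n in required_runtime_imports} - satisfied
-- ===== Notes on version B (the rewrite author's own statement) =====
-- stated objective: alternative
-- what changed: A checks each required name individually against the exports and then does a per-name fallback-dict lookup plus subset test; B never consults the fallback dict per name: it folds the whole fallback table once into an 'effective availability' set (exports plus every fallback key whose exports are all present) and returns one set difference against it.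
import Mathlib
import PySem

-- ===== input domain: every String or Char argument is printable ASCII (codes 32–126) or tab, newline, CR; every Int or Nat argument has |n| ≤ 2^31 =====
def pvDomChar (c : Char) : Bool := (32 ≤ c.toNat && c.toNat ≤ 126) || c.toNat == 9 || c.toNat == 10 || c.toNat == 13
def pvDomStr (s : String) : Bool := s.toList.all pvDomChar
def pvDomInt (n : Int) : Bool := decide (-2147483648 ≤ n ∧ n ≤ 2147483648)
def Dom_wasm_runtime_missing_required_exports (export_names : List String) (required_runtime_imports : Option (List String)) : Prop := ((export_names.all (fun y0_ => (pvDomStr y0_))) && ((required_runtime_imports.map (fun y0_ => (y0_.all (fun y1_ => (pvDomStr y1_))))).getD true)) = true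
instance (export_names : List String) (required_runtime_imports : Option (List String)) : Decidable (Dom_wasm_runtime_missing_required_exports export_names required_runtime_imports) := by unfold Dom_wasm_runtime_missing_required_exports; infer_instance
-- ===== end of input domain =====

-- B replaces A's per-required-name loop (with its per-name fallback-dict lookup and subset test)
-- by folding the fallback table ONCE into an 'effective availability' set and taking one set difference.

-- ===== PORT A =====
-- module constant _BROWSER_RUNTIME_IMPORT_FALLBACK_EXPORTS (shared by both Pythons)
def pvFallbackDict : PySem.Dict String (List String) := PySem.Dict.ofList [
  ("molt_resource_on_allocate", []),
  ("molt_resource_on_free", []),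
  ("molt_fast_list_append", ["molt_call_bind_ic", "molt_callargs_new", "molt_callargs_push_pos"]),
  ("molt_fast_str_join", ["molt_call_bind_ic", "molt_callargs_new", "molt_callargs_push_pos"]),
  ("molt_fast_dict_get", ["molt_call_bind_ic", "molt_callargs_new", "molt_callargs_push_pos"]),
  ("molt_dict_setitem", ["molt_dict_set"]),
  ("molt_dict_getitem", ["molt_dict_getitem_borrowed"]),
  ("molt_tuple_getitem", ["molt_tuple_getitem_borrowed"])]

-- module helper _normalize_runtime_export_name (shared by both Pythons)
def pvNormalize (name : String) : String :=
  if PySem.Str.startswith name "molt_" then name else PySem.Str.join "" ["molt_", name]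

def wasm_runtime_missing_required_exports (export_names : List String) (required_runtime_imports : Option (List String)) : List String :=
  match required_runtime_imports with
  | none => PySem.Set.empty
  | some reqs =>
    if reqs.isEmpty then PySem.Set.empty
    else
      let available : PySem.Set String := PySem.Set.ofList export_names
      reqs.foldl (fun missing raw_name =>
        let name := pvNormalize raw_name
        if PySem.Set.contains available name then missing
        else
          match PySem.Dict.get? pvFallbackDict name with
          | some fallback_exports =>
              if PySem.Set.issubset (PySem.Set.ofList fallback_exports) available then missing
              else PySem.Set.add missing name
          | none => PySem.Set.add missing name) PySem.Set.empty

-- ===== PORT B =====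
def wasm_runtime_missing_required_exports_alt (export_names : List String) (required_runtime_imports : Option (List String)) : List String :=
  match required_runtime_imports with
  | none => PySem.Set.empty
  | some reqs =>
    if reqs.isEmpty then PySem.Set.empty
    else
      let available : PySem.Set String := PySem.Set.ofList export_names
      let covered : PySem.Set String := PySem.Set.ofList
        (((PySem.Dict.items pvFallbackDict).filter (fun kv => PySem.Set.issuperset available kv.2)).map Prod.fst)
      let satisfied : PySem.Set String := PySem.Set.union available covered
      PySem.Set.diff (PySem.Set.ofList (reqs.map pvNormalize)) satisfied

-- ===== PRECONDITION & SPEC =====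
def Spec_wasm_runtime_missing_required_exports (export_names : List String) (required_runtime_imports : Option (List String)) (out : List String) : Prop := out = wasm_runtime_missing_required_exports_alt export_names required_runtime_imports
instance (export_names : List String) (required_runtime_imports : Option (List String)) (out : List String) : Decidable (Spec_wasm_runtime_missing_required_exports export_names required_runtime_imports out) := by unfold Spec_wasm_runtime_missing_required_exports; infer_instance

-- ===== CLAIM (what is proved, stated in full; the proofs are below) =====
def Claim_equal_wasm_runtime_missing_required_exports : Prop := ∀ (export_names : List String) (required_runtime_imports : Option (List String)), Dom_wasm_runtime_missing_required_exports export_names required_runtime_imports → Spec_wasm_runtime_missing_required_exports export_names required_runtime_imports (wasm_runtime_missing_required_exports export_names required_runtime_imports)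

-- ===== LEMMAS AND PROOFS =====

-- A's conditional-add loop is the plain set-build of the kept normalized names.
theorem foldl_if_add (p : String → Bool) (f : String → String) (xs : List String) (acc : PySem.Set String) :
    xs.foldl (fun m x => if p (f x) then m else PySem.Set.add m (f x)) acc
      = ((xs.map f).filter (fun n => !p n)).foldl PySem.Set.add acc := by
  induction xs generalizing acc with
  | nil => rfl
  | cons x xs ih =>
    simp only [List.foldl_cons, List.map_cons, List.filter_cons]
    by_cases h : p (f x) <;> simp [h, ih]

-- building a set from a filtered list = filtering the set built from the whole list
theorem ofList_filter (q : String → Bool) (xs : List String) (acc : PySem.Set String) :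
    (xs.filter q).foldl PySem.Set.add (acc.filter q) = (xs.foldl PySem.Set.add acc).filter q := by
  induction xs generalizing acc with
  | nil => rfl
  | cons x xs ih =>
    simp only [List.filter_cons, List.foldl_cons]
    by_cases hq : q x
    · have : PySem.Set.add (acc.filter q) x = (PySem.Set.add acc x).filter q := by
        by_cases hm : x ∈ acc
        · simp [List.mem_filter, hm, hq]
        · have : x ∉ acc.filter q := fun h => hm (List.mem_of_mem_filter h)
          simp [PySem.Set.add_of_not_mem hm, PySem.Set.add_of_not_mem this, List.filter_append, hq]
      simp only [hq, if_pos, List.foldl_cons]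
      rw [this, ih]
    · have : (PySem.Set.add acc x).filter q = acc.filter q := by
        by_cases hm : x ∈ acc
        · simp [PySem.Set.add_of_mem hm]
        · simp [PySem.Set.add_of_not_mem hm, List.filter_append, hq]
      simp only [hq, Bool.false_eq_true, if_false]
      rw [← this]
      exact ih (PySem.Set.add acc x)

-- dict helpers: the literal items and get?-as-find? characterisation of the fallback table
theorem hitems : PySem.Dict.items pvFallbackDict = [
  ("molt_resource_on_allocate", []),
  ("molt_resource_on_free", []),
  ("molt_fast_list_append", ["molt_call_bind_ic", "molt_callargs_new", "molt_callargs_push_pos"]),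
  ("molt_fast_str_join", ["molt_call_bind_ic", "molt_callargs_new", "molt_callargs_push_pos"]),
  ("molt_fast_dict_get", ["molt_call_bind_ic", "molt_callargs_new", "molt_callargs_push_pos"]),
  ("molt_dict_setitem", ["molt_dict_set"]),
  ("molt_dict_getitem", ["molt_dict_getitem_borrowed"]),
  ("molt_tuple_getitem", ["molt_tuple_getitem_borrowed"])] := by decide
theorem hget (n : String) : PySem.Dict.get? pvFallbackDict n =
    Option.map (fun x => x.2) (List.find? (fun p => p.1 == n) (PySem.Dict.items pvFallbackDict)) := by
  simp [PySem.Dict.get?, PySem.Dict.items]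


theorem cov_eq_satisfied (avail : PySem.Set String) (n : String) :
    (PySem.Set.contains avail n ||
      (match PySem.Dict.get? pvFallbackDict n with
       | some fb => PySem.Set.issubset (PySem.Set.ofList fb) avail
       | none => false))
    = PySem.Set.contains (PySem.Set.union avail (PySem.Set.ofList
        (((PySem.Dict.items pvFallbackDict).filter (fun kv => PySem.Set.issuperset avail kv.2)).map Prod.fst))) n := by
  rw [hget, hitems, Bool.eq_iff_iff]
  by_cases h1 : "molt_resource_on_allocate" = n
  · subst h1
    simp [List.find?, PySem.Set.contains_iff, PySem.Set.mem_union, PySem.Set.mem_ofList,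
      PySem.Set.issubset_iff, PySem.Set.issuperset_iff, List.mem_map, List.mem_filter,
      Bool.or_eq_true]
  by_cases h2 : "molt_resource_on_free" = n
  · subst h2
    simp [List.find?, PySem.Set.contains_iff, PySem.Set.mem_union, PySem.Set.mem_ofList,
      PySem.Set.issubset_iff, PySem.Set.issuperset_iff, List.mem_map, List.mem_filter,
      Bool.or_eq_true]
  by_cases h3 : "molt_fast_list_append" = n
  · subst h3
    simp [List.find?, PySem.Set.contains_iff, PySem.Set.mem_union, PySem.Set.mem_ofList,
      PySem.Set.issubset_iff, PySem.Set.issuperset_iff, List.mem_map, List.mem_filter,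
      Bool.or_eq_true]
  by_cases h4 : "molt_fast_str_join" = n
  · subst h4
    simp [List.find?, PySem.Set.contains_iff, PySem.Set.mem_union, PySem.Set.mem_ofList,
      PySem.Set.issubset_iff, PySem.Set.issuperset_iff, List.mem_map, List.mem_filter,
      Bool.or_eq_true]
  by_cases h5 : "molt_fast_dict_get" = n
  · subst h5
    simp [List.find?, PySem.Set.contains_iff, PySem.Set.mem_union, PySem.Set.mem_ofList,
      PySem.Set.issubset_iff, PySem.Set.issuperset_iff, List.mem_map, List.mem_filter,
      Bool.or_eq_true]
  by_cases h6 : "molt_dict_setitem" = n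
  · subst h6
    simp [List.find?, PySem.Set.contains_iff, PySem.Set.mem_union, PySem.Set.mem_ofList,
      PySem.Set.issubset_iff, PySem.Set.issuperset_iff, List.mem_map, List.mem_filter,
      Bool.or_eq_true]
  by_cases h7 : "molt_dict_getitem" = n
  · subst h7
    simp [List.find?, PySem.Set.contains_iff, PySem.Set.mem_union, PySem.Set.mem_ofList,
      PySem.Set.issubset_iff, PySem.Set.issuperset_iff, List.mem_map, List.mem_filter,
      Bool.or_eq_true]
  by_cases h8 : "molt_tuple_getitem" = n
  · subst h8
    simp [List.find?, PySem.Set.contains_iff, PySem.Set.mem_union, PySem.Set.mem_ofList,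
      PySem.Set.issubset_iff, PySem.Set.issuperset_iff, List.mem_map, List.mem_filter,
      Bool.or_eq_true]
  have hf : List.find? (fun p => p.1 == n) ([("molt_resource_on_allocate", []), ("molt_resource_on_free", []), ("molt_fast_list_append", ["molt_call_bind_ic", "molt_callargs_new", "molt_callargs_push_pos"]), ("molt_fast_str_join", ["molt_call_bind_ic", "molt_callargs_new", "molt_callargs_push_pos"]), ("molt_fast_dict_get", ["molt_call_bind_ic", "molt_callargs_new", "molt_callargs_push_pos"]), ("molt_dict_setitem", ["molt_dict_set"]), ("molt_dict_getitem", ["molt_dict_getitem_borrowed"]), ("molt_tuple_getitem", ["molt_tuple_getitem_borrowed"])] : List (String × List String)) = none := by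
    simp [List.find?_eq_none, beq_iff_eq, h1, h2, h3, h4, h5, h6, h7, h8]
  rw [hf]
  simp [List.find?, PySem.Set.contains_iff, PySem.Set.mem_union, PySem.Set.mem_ofList,
      PySem.Set.issubset_iff, PySem.Set.issuperset_iff, List.mem_map, List.mem_filter,
      Bool.or_eq_true, h1, h2, h3, h4, h5, h6, h7, h8, Ne.symm h1, Ne.symm h2, Ne.symm h3, Ne.symm h4, Ne.symm h5, Ne.symm h6, Ne.symm h7, Ne.symm h8]

-- ===== VERDICT (by name: the statement is the Claim_ definition above) =====
theorem wasm_runtime_missing_required_exports_spec : Claim_equal_wasm_runtime_missing_required_exports := by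
  intro export_names required_runtime_imports _
  unfold Spec_wasm_runtime_missing_required_exports
  unfold wasm_runtime_missing_required_exports wasm_runtime_missing_required_exports_alt
  match required_runtime_imports with
  | none => rfl
  | some reqs =>
    simp only
    by_cases he : reqs.isEmpty
    · simp [he]
    · simp only [he, if_neg, Bool.false_eq_true, not_false_iff]
      set available := PySem.Set.ofList export_names with havail
      set satisfied : PySem.Set String := PySem.Set.union available (PySem.Set.ofList
        (((PySem.Dict.items pvFallbackDict).filter (fun kv => PySem.Set.issuperset available kv.2)).map Prod.fst)) with hsat
      set cov : String → Bool := fun n => PySem.Set.contains satisfied n with hcov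
      have hA : reqs.foldl (fun missing raw_name =>
          let name := pvNormalize raw_name
          if PySem.Set.contains available name then missing
          else
            match PySem.Dict.get? pvFallbackDict name with
            | some fallback_exports =>
                if PySem.Set.issubset (PySem.Set.ofList fallback_exports) available then missing
                else PySem.Set.add missing name
            | none => PySem.Set.add missing name) PySem.Set.empty
        = reqs.foldl (fun m x => if cov (pvNormalize x) then m else PySem.Set.add m (pvNormalize x)) PySem.Set.empty := by
        apply PySem.List.foldl_congr_mem
        intro m x _
        simp only [hcov, hsat, ← cov_eq_satisfied]
        by_cases h1 : pvNormalize x ∈ available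
        · simp [h1, (PySem.Set.contains_iff _ _).mpr h1]
        · cases hfb : PySem.Dict.get? pvFallbackDict (pvNormalize x) with
          | none => simp [h1, hfb, PySem.Set.contains_iff]
          | some fb =>
            by_cases h2 : ∀ y ∈ fb, y ∈ available <;>
              simp [h1, hfb, h2, PySem.Set.contains_iff, PySem.Set.issubset_iff,
                PySem.Set.mem_ofList]
      rw [hA, foldl_if_add cov pvNormalize reqs PySem.Set.empty]
      have e1 : ((reqs.map pvNormalize).filter (fun n => !cov n)).foldl PySem.Set.add PySem.Set.empty
          = ((reqs.map pvNormalize).foldl PySem.Set.add PySem.Set.empty).filter (fun n => !cov n) :=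
        ofList_filter _ _ PySem.Set.empty
      rw [e1]
      have hdiff : PySem.Set.diff (PySem.Set.ofList (reqs.map pvNormalize)) satisfied
          = (PySem.Set.ofList (reqs.map pvNormalize)).filter (fun x => !(PySem.Set.contains satisfied x)) := by
        simp [PySem.Set.diff, PySem.Set.contains]
      rw [hdiff, PySem.Set.ofList_eq_foldl]
      rfl
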